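-- pv_equiv track=rewrite | github.com/Researcher-Feng/SoftwareEngineer_Calculator | test/test_limit.py | count_unique_expressions
-- ===== SOURCE A (Python) =====
-- import itertools
-- import math
--
-- def count_unique_expressions(n):
--     if n < 2:
--         return 0  # 如果数字少于2个，不能生成有效的算式
--
--     # 运算符
--     all_operators = ['+', '-', '*', '÷']
--
--     # 处理交换律的影响: + 和 * 的组合会引入重复
--     unique_operator_combinations = set()
--     for ops in itertools.product(all_operators, repeat=min(3, n - 1)):
--         # 对可交换的运算符 ('+', '*') 排序，使其被认为是相同的表达式
--         sorted_ops = tuple(sorted(ops, key=lambda x: (x == '+' or x == '*')))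
--         unique_operator_combinations.add(sorted_ops)
--
--     unique_operator_count = len(unique_operator_combinations)
--
--     # 根据n的不同情况计算可能的表达式数量
--     if n == 2:
--         # 当有2个数字时，只能有1个运算符
--         num_permutations = math.perm(n, 2)  # 两个数字的排列
--         operator_combinations = len(all_operators)  # 只能有1个运算符
--         total_expressions = num_permutations * operator_combinations
--     elif n == 3:
--         # 当有3个数字时，可以有最多2个运算符
--         num_permutations = math.perm(n, 3)  # 三个数字的排列
--         operator_combinations = 4 ** 2  # 每个位置有2个运算符
--         total_expressions = num_permutations * operator_combinations
--     else:
--         # 当有4个或更多数字时，可以有最多3个运算符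
--         num_permutations = math.perm(n, 4)  # 四个数字的排列
--         total_expressions = num_permutations * unique_operator_count
--
--     return total_expressions
-- ===== SOURCE B (Python) =====
-- def count_unique_expressions(n):
--     if n < 2:
--         return 0
--     if n == 2:
--         return 8
--     if n == 3:
--         return 96
--     return 32 * n * (n - 1) * (n - 2) * (n - 3)
-- ===== Notes on version B (the rewrite author's own statement) =====
-- stated objective: simpler
-- what changed: Replaced the operator-tuple enumeration with stable-sort dedup and the math.perm calls by a pure case-based closed form, since the deduplicated operator-combination count for three slots is a fixed constant.
import Mathlib
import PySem

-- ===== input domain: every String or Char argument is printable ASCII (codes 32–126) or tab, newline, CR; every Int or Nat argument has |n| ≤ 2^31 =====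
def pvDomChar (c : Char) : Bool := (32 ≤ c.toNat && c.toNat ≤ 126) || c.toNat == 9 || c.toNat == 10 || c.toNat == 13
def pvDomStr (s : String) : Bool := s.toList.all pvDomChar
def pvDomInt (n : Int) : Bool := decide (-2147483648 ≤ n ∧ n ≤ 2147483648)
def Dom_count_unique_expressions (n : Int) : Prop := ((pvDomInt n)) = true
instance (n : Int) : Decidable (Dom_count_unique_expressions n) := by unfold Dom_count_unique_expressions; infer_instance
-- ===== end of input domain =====

-- B replaces A's operator-tuple enumeration and math.perm calls by a case-based closed form (simpler, constant arithmetic only).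

-- ===== PORT A =====
-- all_operators
def pvAllOperators : List String := ["+", "-", "*", "÷"]

-- itertools.product(all_operators, repeat=k): first coordinate varies slowest
def pvProduct : Nat → List (List String)
  | 0 => [[]]
  | k + 1 => pvAllOperators.flatMap (fun a => (pvProduct k).map (fun rest => a :: rest))

-- key=lambda x: (x == '+' or x == '*') — Python bools compare as 0 < 1
def pvOpKey (x : String) : Nat := if x = "+" || x = "*" then 1 else 0

-- math.perm(n, k) for k ≥ 0: n·(n-1)·…·(n-k+1)
def pvPerm (n k : Int) : Int :=
  (PySem.List.pyRange 0 k 1).foldl (fun acc i => acc * (n - i)) 1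

def count_unique_expressions (n : Int) : Int :=
  if n < 2 then 0
  else
    -- the set of sorted operator tuples, built tuple by tuple
    let uniqueOperatorCount : Int :=
      ((pvProduct (min 3 (n - 1)).toNat).foldl
        (fun s ops => PySem.Set.add s (PySem.List.sorted ops pvOpKey false))
        PySem.Set.empty).length
    if n = 2 then pvPerm n 2 * 4
    else if n = 3 then pvPerm n 3 * 4 ^ 2
    else pvPerm n 4 * uniqueOperatorCount

-- ===== PORT B =====
def count_unique_expressions_alt (n : Int) : Int :=
  if n < 2 then 0
  else if n = 2 then 8
  else if n = 3 then 96
  else 32 * n * (n - 1) * (n - 2) * (n - 3)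

-- ===== PRECONDITION & SPEC =====
def Spec_count_unique_expressions (n : Int) (out : Int) : Prop := out = count_unique_expressions_alt n
instance (n : Int) (out : Int) : Decidable (Spec_count_unique_expressions n out) := by unfold Spec_count_unique_expressions; infer_instance

-- ===== CLAIM (what is proved, stated in full; the proofs are below) =====
def Claim_equal_count_unique_expressions : Prop := ∀ (n : Int), Dom_count_unique_expressions n → Spec_count_unique_expressions n (count_unique_expressions n)

-- ===== LEMMAS AND PROOFS =====

-- the deduplicated operator-combination count for three slots is 32
theorem pvUniqueCount3 :
    (((pvProduct 3).foldl
        (fun s ops => PySem.Set.add s (PySem.List.sorted ops pvOpKey false))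
        PySem.Set.empty).length : Int) = 32 := by
  set_option maxRecDepth 8192 in decide

theorem pvRange04 : PySem.List.pyRange 0 4 1 = [0, 1, 2, 3] := by decide

theorem pvPerm4 (n : Int) : pvPerm n 4 = n * (n - 1) * (n - 2) * (n - 3) := by
  simp only [pvPerm, pvRange04, List.foldl]; ring

-- ===== VERDICT (by name: the statement is the Claim_ definition above) =====
theorem count_unique_expressions_spec : Claim_equal_count_unique_expressions := by
  intro n _
  unfold Spec_count_unique_expressions count_unique_expressions count_unique_expressions_alt
  by_cases h2 : n < 2
  · simp [h2]
  · by_cases e2 : n = 2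
    · subst e2; decide
    · by_cases e3 : n = 3
      · subst e3; decide
      · have hmin : (min 3 (n - 1)).toNat = 3 := by omega
        simp only [if_neg h2, if_neg e2, if_neg e3, hmin]
        rw [pvUniqueCount3, pvPerm4]; ring
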